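-- pv_equiv track=rewrite | github.com/anilsenay/2048-Game-AI | heuristics/heuristic_5.py | heuristic5
-- ===== SOURCE A (Python) =====
-- def heuristic5(BOARD):
--     scores = [[0, 0, 0, 0], [0, 0, 0, 0], [0, 0, 0, 0], [0, 0, 0, 0]]
--     for i in range(4):
--         for j in range(4):
--             for a in range(j + 1, 4):
--                 if(BOARD[i][a] == 0):
--                     continue
--                 if(BOARD[i][j] == BOARD[i][a]):
--                     scores[i][j] = scores[i][j] + 1
--                     break
--
--             for a in reversed(range(0, j)):
--                 if(BOARD[i][a] == 0):
--                     continue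
--                 if(BOARD[i][j] == BOARD[i][a]):
--                     scores[i][j] = scores[i][j] + 1
--                     break
--
--             for a in range(i + 1, 4):
--                 if(BOARD[a][j] == 0):
--                     continue
--                 if(BOARD[i][j] == BOARD[a][j]):
--                     scores[i][j] = scores[i][j] + 1
--                     break
--
--             for a in reversed(range(0, i)):
--                 if(BOARD[a][j] == 0):
--                     continue
--                 if(BOARD[i][j] == BOARD[a][j]):
--                     scores[i][j] = scores[i][j] + 1
--                     break
--
--     totalScores = 0
--     for i in range(4):
--         for j in range(4):
--             totalScores = totalScores + BOARD[i][j] ** scores[i][j]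
--     return totalScores
-- ===== SOURCE B (Python) =====
-- def _line_bonus(vals):
--     # one pass builds first/last occurrence index of each non-zero value;
--     # a cell gets +1 per side on which its value occurs again (non-zero)
--     first = {}
--     last = {}
--     for k, v in enumerate(vals):
--         if v != 0:
--             if v not in first:
--                 first[v] = k
--             last[v] = k
--     return [0 if v == 0 else (1 if first[v] < k else 0) + (1 if last[v] > k else 0)
--             for k, v in enumerate(vals)]
--
--
-- def heuristic5(BOARD):
--     rows = [[BOARD[i][j] for j in range(4)] for i in range(4)]
--     cols = [[BOARD[i][j] for i in range(4)] for j in range(4)]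
--     rb = [_line_bonus(r) for r in rows]
--     cb = [_line_bonus(c) for c in cols]
--     return sum(rows[i][j] ** (rb[i][j] + cb[j][i]) for i in range(4) for j in range(4))
-- ===== Notes on version B (the rewrite author's own statement) =====
-- stated objective: alternative
-- what changed: A runs four outward scanning loops with skip/break per cell (16 cells x 4 scans); B makes one pass per row/column building first/last-occurrence indices of each non-zero value in dicts and reads each cell's two direction bonuses from those indices.
import Mathlib
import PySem

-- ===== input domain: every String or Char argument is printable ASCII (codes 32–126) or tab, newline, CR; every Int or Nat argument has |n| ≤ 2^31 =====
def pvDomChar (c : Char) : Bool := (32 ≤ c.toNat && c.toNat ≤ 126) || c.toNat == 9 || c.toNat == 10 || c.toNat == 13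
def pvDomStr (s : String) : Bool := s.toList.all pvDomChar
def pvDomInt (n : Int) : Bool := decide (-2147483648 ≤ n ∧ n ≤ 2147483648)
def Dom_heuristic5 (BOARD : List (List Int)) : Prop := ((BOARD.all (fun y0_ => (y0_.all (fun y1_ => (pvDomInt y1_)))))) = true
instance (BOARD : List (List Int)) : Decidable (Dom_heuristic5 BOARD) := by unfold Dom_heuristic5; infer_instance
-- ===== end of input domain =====

-- B replaces A's four per-cell outward scans by one pass per row/column that indexes the
-- first and last position of every non-zero value (objective: simpler per-line passes).

-- ===== PORT A =====

-- BOARD[i][j], shared subscript helper of both ports; exact on Pre_ (indices 0..3 are then in range)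
def pvIdx (B : List (List Int)) (i j : Int) : Int :=
  PySem.List.pyGetD (PySem.List.pyGetD B i []) j 0

-- one of A's four direction loops over the listed cell values:
-- 'if v == 0: continue; if target == v: score += 1; break'
def pvBreakScan (v : Int) : List Int → Int
  | [] => 0
  | x :: rest => if x = 0 then pvBreakScan v rest else if v = x then 1 else pvBreakScan v rest

def heuristic5 (BOARD : List (List Int)) : Int :=
  -- scores[i][j] accumulates the four direction loops (each adds 0 or 1)
  let scores : List (List Int) :=
    (PySem.List.pyRange 0 4 1).map (fun i =>
      (PySem.List.pyRange 0 4 1).map (fun j =>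
        pvBreakScan (pvIdx BOARD i j) ((PySem.List.pyRange (j+1) 4 1).map (fun a => pvIdx BOARD i a))
        + pvBreakScan (pvIdx BOARD i j) ((PySem.List.pyRange 0 j 1).reverse.map (fun a => pvIdx BOARD i a))
        + pvBreakScan (pvIdx BOARD i j) ((PySem.List.pyRange (i+1) 4 1).map (fun a => pvIdx BOARD a j))
        + pvBreakScan (pvIdx BOARD i j) ((PySem.List.pyRange 0 i 1).reverse.map (fun a => pvIdx BOARD a j))))
  -- totalScores = totalScores + BOARD[i][j] ** scores[i][j]  (exponent is 0..4, so toNat is exact)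
  (PySem.List.pyRange 0 4 1).foldl (fun t i =>
    (PySem.List.pyRange 0 4 1).foldl (fun t j =>
      t + pvIdx BOARD i j ^ (pvIdx scores i j).toNat) t) 0

-- ===== PORT B =====

-- body of Source B's first/last-building loop in _line_bonus
def pvStep (fl : PySem.Dict Int Int × PySem.Dict Int Int) (kv : Int × Int) :
    PySem.Dict Int Int × PySem.Dict Int Int :=
  if kv.2 ≠ 0 then
    ((if fl.1.contains kv.2 then fl.1 else fl.1.insert kv.2 kv.1), fl.2.insert kv.2 kv.1)
  else fl

-- _line_bonus; 'first[v]'/'last[v]' are ported as getD _ 0: the key is always present there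
def pvLineBonus (vals : List Int) : List Int :=
  let fl := (PySem.List.enumerate vals).foldl pvStep (PySem.Dict.empty, PySem.Dict.empty)
  (PySem.List.enumerate vals).map (fun kv =>
    if kv.2 = 0 then 0 else
      (if fl.1.getD kv.2 0 < kv.1 then 1 else 0) + (if fl.2.getD kv.2 0 > kv.1 then 1 else 0))

def heuristic5_alt (BOARD : List (List Int)) : Int :=
  let rows := (PySem.List.pyRange 0 4 1).map (fun i =>
    (PySem.List.pyRange 0 4 1).map (fun j => pvIdx BOARD i j))
  let cols := (PySem.List.pyRange 0 4 1).map (fun j =>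
    (PySem.List.pyRange 0 4 1).map (fun i => pvIdx BOARD i j))
  let rb := rows.map pvLineBonus
  let cb := cols.map pvLineBonus
  ((PySem.List.pyRange 0 4 1).map (fun i =>
    ((PySem.List.pyRange 0 4 1).map (fun j =>
      pvIdx rows i j ^ ((pvIdx rb i j + pvIdx cb j i).toNat))).sum)).sum

-- ===== PRECONDITION & SPEC =====

-- exactly the inputs A returns on: fewer than 4 rows, or fewer than 4 entries in one of the
-- first 4 rows, makes A raise IndexError (B raises there too)
def Pre_heuristic5 (BOARD : List (List Int)) : Prop :=
  4 ≤ BOARD.length ∧ ∀ r ∈ BOARD.take 4, 4 ≤ r.length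

instance (BOARD : List (List Int)) : Decidable (Pre_heuristic5 BOARD) := by
  unfold Pre_heuristic5; infer_instance

def pvWitness_heuristic5 : List (List Int) :=
  [[2, 2, 0, 4], [0, 4, 8, 2], [2, 0, 2, 4], [4, 8, 2, 0]]

def Spec_heuristic5 (BOARD : List (List Int)) (out : Int) : Prop := out = heuristic5_alt BOARD

instance (BOARD : List (List Int)) (out : Int) : Decidable (Spec_heuristic5 BOARD out) := by
  unfold Spec_heuristic5; infer_instance

-- ===== CLAIM =====

def Claim_equal_heuristic5 : Prop :=
  ∀ (BOARD : List (List Int)), Dom_heuristic5 BOARD → Pre_heuristic5 BOARD →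
    Spec_heuristic5 BOARD (heuristic5 BOARD)

-- ===== LEMMAS AND PROOFS =====

-- the 'first' dict after Source B's building loop: old binding, else first matching index
theorem first_char (vals : List Int) (s : Int) (fl : PySem.Dict Int Int × PySem.Dict Int Int)
    (v : Int) (hv : v ≠ 0) :
    ((PySem.List.enumerate vals s).foldl pvStep fl).1.get? v =
      (fl.1.get? v).or (((PySem.List.enumerate vals s).find? (fun kv => kv.2 == v)).map (·.1)) := by
  induction vals generalizing s fl with
  | nil => simp [PySem.List.enumerate_nil]
  | cons x xs ih =>
    rw [PySem.List.enumerate_cons]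
    simp only [List.foldl_cons, List.find?_cons]
    rw [ih]
    by_cases hx : x = 0
    · subst hx
      have hbe : ((0:Int) == v) = false := by simpa using (Ne.symm hv)
      simp [pvStep, hbe]
    · by_cases hxv : x = v
      · subst hxv
        simp only [pvStep, if_pos hx, beq_self_eq_true, ne_eq]
        by_cases hc : fl.1.contains x
        · rw [if_pos hc]
          cases h : fl.1.get? x with
          | none =>
            rw [PySem.Dict.get?_eq_none_iff_contains] at h
            simp_all
          | some w => simp [h]
        · rw [if_neg hc]
          have h : fl.1.get? x = none := (PySem.Dict.get?_eq_none_iff_contains _ _).2 (by simp_all)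
          simp [h, PySem.Dict.get?_insert_self]
      · have hbe : (x == v) = false := by simp [hxv]
        simp only [pvStep, if_pos hx, hbe, ne_eq]
        by_cases hc : fl.1.contains x <;>
          simp_all [PySem.Dict.get?_insert_of_ne _ _ (fun h => hxv h.symm)]

-- the 'last' dict after Source B's building loop: last matching index, else old binding
theorem last_char (vals : List Int) (s : Int) (fl : PySem.Dict Int Int × PySem.Dict Int Int)
    (v : Int) (hv : v ≠ 0) :
    ((PySem.List.enumerate vals s).foldl pvStep fl).2.get? v =
      ((((PySem.List.enumerate vals s).reverse.find? (fun kv => kv.2 == v)).map (·.1)).or (fl.2.get? v)) := by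
  induction vals generalizing s fl with
  | nil => simp [PySem.List.enumerate_nil]
  | cons x xs ih =>
    rw [PySem.List.enumerate_cons]
    simp only [List.foldl_cons, List.reverse_cons, List.find?_append]
    rw [ih]
    by_cases hx : x = 0
    · subst hx
      have hbe : ((0:Int) == v) = false := by simpa using (Ne.symm hv)
      simp [pvStep, hbe]
    · by_cases hxv : x = v
      · subst hxv
        simp only [pvStep, if_pos hx, ne_eq]
        cases h : (List.find? (fun kv => kv.2 == x) (PySem.List.enumerate xs (s + 1)).reverse) <;>
          simp_all [PySem.Dict.get?_insert_self]
      · have hbe : (x == v) = false := by simp [hxv]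
        simp only [pvStep, if_pos hx, ne_eq]
        cases h : (List.find? (fun kv => kv.2 == v) (PySem.List.enumerate xs (s + 1)).reverse) <;>
          simp_all [PySem.Dict.get?_insert_of_ne _ _ (fun h => hxv h.symm), hbe]

theorem pvBreakScan_eq (v : Int) (l : List Int) :
    pvBreakScan v l = if v ≠ 0 ∧ v ∈ l then 1 else 0 := by
  induction l with
  | nil => simp [pvBreakScan]
  | cons x xs ih =>
    by_cases hx : x = 0 <;> by_cases hvx : v = x <;>
      simp_all [pvBreakScan] <;> split_ifs <;> simp_all

-- B's per-line bonuses coincide with A's two in-line direction scans, cell by cell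
set_option maxHeartbeats 1000000 in
theorem line4 (a b c d : Int) :
  pvLineBonus [a,b,c,d] =
    [ pvBreakScan a [b,c,d] + pvBreakScan a [],
      pvBreakScan b [c,d] + pvBreakScan b [a],
      pvBreakScan c [d] + pvBreakScan c [b,a],
      pvBreakScan d [] + pvBreakScan d [c,b,a] ] := by
  have h1 := first_char [a,b,c,d] 0 (PySem.Dict.empty, PySem.Dict.empty)
  have h2 := last_char [a,b,c,d] 0 (PySem.Dict.empty, PySem.Dict.empty)
  simp only [PySem.Dict.get?_empty, Option.or_none, Option.none_or,
    PySem.List.enumerate_cons, PySem.List.enumerate_nil] at h1 h2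
  simp only [pvLineBonus, PySem.List.enumerate_cons, PySem.List.enumerate_nil,
    List.map_cons, List.map_nil, List.cons.injEq, and_true, pvBreakScan_eq]
  refine ⟨?_, ?_, ?_, ?_⟩
  · by_cases hv : a = 0
    · simp [hv]
    · rw [if_neg hv]
      simp only [PySem.Dict.getD_eq_get?_getD, h1 a hv, h2 a hv]
      simp only [List.reverse_cons, List.reverse_nil, List.nil_append, List.cons_append,
        List.find?_cons, List.find?_nil]
      rcases Bool.eq_false_or_eq_true (b == a) with e1 | e1 <;>
        rcases Bool.eq_false_or_eq_true (c == a) with e2 | e2 <;>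
        rcases Bool.eq_false_or_eq_true (d == a) with e3 | e3 <;>
        simp_all [beq_eq_decide] <;> (try split_ifs) <;> (try simp_all) <;> omega
  · by_cases hv : b = 0
    · simp [hv]
    · rw [if_neg hv]
      simp only [PySem.Dict.getD_eq_get?_getD, h1 b hv, h2 b hv]
      simp only [List.reverse_cons, List.reverse_nil, List.nil_append, List.cons_append,
        List.find?_cons, List.find?_nil]
      rcases Bool.eq_false_or_eq_true (a == b) with e1 | e1 <;>
        rcases Bool.eq_false_or_eq_true (c == b) with e2 | e2 <;>
        rcases Bool.eq_false_or_eq_true (d == b) with e3 | e3 <;>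
        simp_all [beq_eq_decide] <;> (try split_ifs) <;> (try simp_all) <;> omega
  · by_cases hv : c = 0
    · simp [hv]
    · rw [if_neg hv]
      simp only [PySem.Dict.getD_eq_get?_getD, h1 c hv, h2 c hv]
      simp only [List.reverse_cons, List.reverse_nil, List.nil_append, List.cons_append,
        List.find?_cons, List.find?_nil]
      rcases Bool.eq_false_or_eq_true (a == c) with e1 | e1 <;>
        rcases Bool.eq_false_or_eq_true (b == c) with e2 | e2 <;>
        rcases Bool.eq_false_or_eq_true (d == c) with e3 | e3 <;>
        simp_all [beq_eq_decide] <;> (try split_ifs) <;> (try simp_all) <;> omega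
  · by_cases hv : d = 0
    · simp [hv]
    · rw [if_neg hv]
      simp only [PySem.Dict.getD_eq_get?_getD, h1 d hv, h2 d hv]
      simp only [List.reverse_cons, List.reverse_nil, List.nil_append, List.cons_append,
        List.find?_cons, List.find?_nil]
      rcases Bool.eq_false_or_eq_true (a == d) with e1 | e1 <;>
        rcases Bool.eq_false_or_eq_true (b == d) with e2 | e2 <;>
        rcases Bool.eq_false_or_eq_true (c == d) with e3 | e3 <;>
        simp_all [beq_eq_decide] <;> (try split_ifs) <;> (try simp_all) <;> omega

-- ===== VERDICT =====

set_option maxHeartbeats 4000000 in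
theorem heuristic5_spec : Claim_equal_heuristic5 := by
  intro BOARD _hdom hpre
  unfold Spec_heuristic5
  obtain ⟨hlen, hrows⟩ := hpre
  rcases BOARD with _ | ⟨r0, BOARD⟩; · simp at hlen
  rcases BOARD with _ | ⟨r1, BOARD⟩; · simp at hlen
  rcases BOARD with _ | ⟨r2, BOARD⟩; · simp at hlen
  rcases BOARD with _ | ⟨r3, BOARD⟩; · simp at hlen
  have h0 : 4 ≤ r0.length := hrows r0 (by simp)
  have h1 : 4 ≤ r1.length := hrows r1 (by simp)
  have h2 : 4 ≤ r2.length := hrows r2 (by simp)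
  have h3 : 4 ≤ r3.length := hrows r3 (by simp)
  rcases r0 with _ | ⟨a00, r0⟩; · simp at h0
  rcases r0 with _ | ⟨a01, r0⟩; · simp at h0
  rcases r0 with _ | ⟨a02, r0⟩; · simp at h0
  rcases r0 with _ | ⟨a03, r0⟩; · simp at h0
  rcases r1 with _ | ⟨a10, r1⟩; · simp at h1
  rcases r1 with _ | ⟨a11, r1⟩; · simp at h1
  rcases r1 with _ | ⟨a12, r1⟩; · simp at h1
  rcases r1 with _ | ⟨a13, r1⟩; · simp at h1
  rcases r2 with _ | ⟨a20, r2⟩; · simp at h2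
  rcases r2 with _ | ⟨a21, r2⟩; · simp at h2
  rcases r2 with _ | ⟨a22, r2⟩; · simp at h2
  rcases r2 with _ | ⟨a23, r2⟩; · simp at h2
  rcases r3 with _ | ⟨a30, r3⟩; · simp at h3
  rcases r3 with _ | ⟨a31, r3⟩; · simp at h3
  rcases r3 with _ | ⟨a32, r3⟩; · simp at h3
  rcases r3 with _ | ⟨a33, r3⟩; · simp at h3
  show heuristic5 _ = heuristic5_alt _
  have g0 : ∀ {α : Type} (x0 x1 x2 x3 : α) (t : List α) (d : α),
      PySem.List.pyGetD (x0 :: x1 :: x2 :: x3 :: t) 0 d = x0 := by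
    intro α x0 x1 x2 x3 t d; rw [PySem.List.pyGetD_ofNat']; rfl
  have g1 : ∀ {α : Type} (x0 x1 x2 x3 : α) (t : List α) (d : α),
      PySem.List.pyGetD (x0 :: x1 :: x2 :: x3 :: t) 1 d = x1 := by
    intro α x0 x1 x2 x3 t d; rw [PySem.List.pyGetD_ofNat']; rfl
  have g2 : ∀ {α : Type} (x0 x1 x2 x3 : α) (t : List α) (d : α),
      PySem.List.pyGetD (x0 :: x1 :: x2 :: x3 :: t) 2 d = x2 := by
    intro α x0 x1 x2 x3 t d; rw [PySem.List.pyGetD_ofNat']; rfl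
  have g3 : ∀ {α : Type} (x0 x1 x2 x3 : α) (t : List α) (d : α),
      PySem.List.pyGetD (x0 :: x1 :: x2 :: x3 :: t) 3 d = x3 := by
    intro α x0 x1 x2 x3 t d; rw [PySem.List.pyGetD_ofNat']; rfl
  simp only [heuristic5, heuristic5_alt,
    show PySem.List.pyRange 0 4 1 = [0,1,2,3] from rfl,
    show PySem.List.pyRange (0+1) 4 1 = [1,2,3] from rfl,
    show PySem.List.pyRange (1+1) 4 1 = [2,3] from rfl,
    show PySem.List.pyRange (2+1) 4 1 = [3] from rfl,
    show PySem.List.pyRange (3+1) 4 1 = [] from rfl,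
    show PySem.List.pyRange 0 0 1 = [] from rfl,
    show PySem.List.pyRange 0 1 1 = [0] from rfl,
    show PySem.List.pyRange 0 2 1 = [0,1] from rfl,
    show PySem.List.pyRange 0 3 1 = [0,1,2] from rfl,
    List.map_cons, List.map_nil, List.foldl_cons, List.foldl_nil, List.reverse_cons,
    List.reverse_nil, List.nil_append, List.cons_append, List.sum_cons, List.sum_nil,
    pvIdx, pvIdx, g0, g1, g2, g3]
  rw [line4, line4, line4, line4, line4, line4, line4, line4]
  simp only [g0, g1, g2, g3, add_assoc]
  ring
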